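-- pv_equiv track=rewrite | github.com/nonaninona/algorithm | 백준/Gold/12100. 2048 （Easy）/2048 （Easy）.py | move_list
-- ===== SOURCE A (Python) =====
-- def move_list(list):
--     new_list = []
--     prev = -1
--     for i in range(len(list)):
--         if list[i] == 0:
--             continue
--         if prev == -1:
--             new_list.append(list[i])
--             prev = len(new_list)-1
--             continue
--         if list[i] == new_list[prev]:
--             new_list[prev] *= 2
--             prev = -1
--             continue
--         new_list.append(list[i])
--         prev = len(new_list) - 1
--
--     new_list += [0] * (len(list) - len(new_list))
--     return new_list
-- ===== SOURCE B (Python) =====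
-- def move_list(list):
--     nums = [x for x in list if x != 0]
--     result = []
--     i = 0
--     while i < len(nums):
--         if i + 1 < len(nums) and nums[i] == nums[i + 1]:
--             result.append(2 * nums[i])
--             i += 2
--         else:
--             result.append(nums[i])
--             i += 1
--     return result + [0] * (len(list) - len(result))
-- ===== Notes on version B (the rewrite author's own statement) =====
-- stated objective: simpler
-- what changed: Replaces A's single-pass prev-pointer state machine (with in-place doubling of the merged cell) by a two-phase method: compress out zeros, then a pairwise look-ahead merge scan, then pad with zeros.
import Mathlib
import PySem

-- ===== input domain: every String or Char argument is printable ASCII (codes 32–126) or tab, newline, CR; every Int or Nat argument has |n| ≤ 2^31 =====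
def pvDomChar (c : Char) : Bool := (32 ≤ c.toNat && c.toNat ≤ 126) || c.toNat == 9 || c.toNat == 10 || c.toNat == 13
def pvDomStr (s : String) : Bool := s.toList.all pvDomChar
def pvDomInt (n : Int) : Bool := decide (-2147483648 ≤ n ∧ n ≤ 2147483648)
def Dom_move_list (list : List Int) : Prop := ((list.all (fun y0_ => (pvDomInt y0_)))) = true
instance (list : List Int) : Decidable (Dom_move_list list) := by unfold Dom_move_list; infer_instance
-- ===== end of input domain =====

-- B replaces A's single-pass prev-pointer state machine by compress-zeros + pairwise look-ahead merge + pad (objective: simpler).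

-- ===== PORT A =====
-- loop body of A; new_list[prev] is always in range when read (prev is -1 or len-1), so pyGetD/pySetD are exact here
def moveStep (s : List Int × Int) (x : Int) : List Int × Int :=
  let nl := s.1
  let prev := s.2
  if x = 0 then s
  else if prev = -1 then
    let nl' := nl ++ [x]
    (nl', (nl'.length : Int) - 1)
  else if x = PySem.List.pyGetD nl prev 0 then
    (PySem.List.pySetD nl prev (PySem.List.pyGetD nl prev 0 * 2), -1)
  else
    let nl' := nl ++ [x]
    (nl', (nl'.length : Int) - 1)

def move_list (list : List Int) : List Int :=
  let r := (PySem.List.pyRange 0 (PySem.List.len list) 1).foldl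
             (fun s i => moveStep s (PySem.List.pyGetD list i 0)) ([], -1)
  r.1 ++ List.replicate (list.length - r.1.length) 0

-- ===== PORT B =====
-- B's while-loop over index i with the i+1 look-ahead, as structural recursion on the compressed list
def mergeScan : List Int → List Int
  | [] => []
  | [x] => [x]
  | x :: y :: rest => if x = y then 2 * x :: mergeScan rest else x :: mergeScan (y :: rest)

def move_list_alt (list : List Int) : List Int :=
  let nums := list.filter (fun x => x != 0)
  let result := mergeScan nums
  result ++ List.replicate (list.length - result.length) 0

-- ===== PRECONDITION & SPEC =====
def Spec_move_list (list : List Int) (out : List Int) : Prop := out = move_list_alt list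
instance (list : List Int) (out : List Int) : Decidable (Spec_move_list list out) := by unfold Spec_move_list; infer_instance

-- ===== CLAIM (what is proved, stated in full; the proofs are below) =====
def Claim_equal_move_list : Prop := ∀ (list : List Int), Dom_move_list list → Spec_move_list list (move_list list)

-- ===== LEMMAS AND PROOFS =====

theorem moveStep_zero (s : List Int × Int) : moveStep s 0 = s := by
  simp [moveStep]

theorem foldl_moveStep_filter (xs : List Int) (s : List Int × Int) :
    xs.foldl moveStep s = (xs.filter (fun x => x != 0)).foldl moveStep s := by
  induction xs generalizing s with
  | nil => rfl
  | cons x xs ih =>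
    by_cases hx : x = 0
    · subst hx; simpa [moveStep_zero] using ih s
    · have hb : (x != 0) = true := by simpa using hx
      simp [List.filter_cons, hb, List.foldl_cons, ih]

theorem set_append_len (nl : List Int) (x v : Int) :
    (nl ++ [x]).set nl.length v = nl ++ [v] := by
  induction nl with
  | nil => rfl
  | cons a t ih => simp [List.set, ih]

theorem getD_append_len (nl : List Int) (x : Int) :
    (nl ++ [x]).getD nl.length 0 = x := by
  simp [List.getD]

-- Key invariant: with one pending (unmerged) element x at the end of nl and prev pointing at it,
-- A's loop over a zero-free suffix ys produces nl ++ mergeScan (x :: ys).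
theorem moveStep_pending (n : Nat) :
    ∀ ys : List Int, ys.length ≤ n → (∀ y ∈ ys, y ≠ 0) → ∀ (nl : List Int) (x : Int),
      (ys.foldl moveStep (nl ++ [x], (nl.length : Int))).1 = nl ++ mergeScan (x :: ys) := by
  induction n with
  | zero =>
    intro ys hlen _ nl x
    have : ys = [] := List.eq_nil_of_length_eq_zero (Nat.le_zero.mp hlen)
    subst this; simp [mergeScan]
  | succ n ih =>
    intro ys hlen hnz nl x
    cases ys with
    | nil => simp [mergeScan]
    | cons y rest =>
      have hy : y ≠ 0 := hnz y (by simp)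
      have hprev : ((nl.length : Int)) ≠ -1 := by omega
      have hget : PySem.List.pyGetD (nl ++ [x]) (nl.length : Int) 0 = x := by
        simpa using getD_append_len nl x
      rw [List.foldl_cons]
      by_cases hxy : y = x
      · subst hxy
        have hstep : moveStep (nl ++ [y], (nl.length : Int)) y
            = (nl ++ [y * 2], -1) := by
          simp only [moveStep, hy, hprev, hget, if_neg, if_pos, if_false]
          simp [hy, hprev, hget, set_append_len]
        rw [hstep]
        have hm : mergeScan (y :: y :: rest) = 2 * y :: mergeScan rest := by
          simp [mergeScan]
        rw [hm]
        cases rest with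
        | nil => simp [mergeScan, mul_comm]
        | cons z rest' =>
          have hz : z ≠ 0 := hnz z (by simp)
          have hstep2 : moveStep (nl ++ [y * 2], -1) z
              = ((nl ++ [y * 2]) ++ [z], (((nl ++ [y * 2]) ++ [z]).length : Int) - 1) := by
            simp [moveStep, hz]
          have hlen2 : (((nl ++ [y * 2]) ++ [z]).length : Int) - 1
              = ((nl ++ [y * 2]).length : Int) := by
            simp; omega
          rw [List.foldl_cons, hstep2, hlen2]
          have hrec := ih rest' (by simp at hlen ⊢; omega)
            (fun w hw => hnz w (by simp [hw])) (nl ++ [y * 2]) z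
          rw [hrec]
          simp [mul_comm]
      · have hstep : moveStep (nl ++ [x], (nl.length : Int)) y
            = ((nl ++ [x]) ++ [y], (((nl ++ [x]) ++ [y]).length : Int) - 1) := by
          simp [moveStep, hy, hprev, hget, hxy]
        have hlen2 : (((nl ++ [x]) ++ [y]).length : Int) - 1
            = ((nl ++ [x]).length : Int) := by
          simp; omega
        rw [hstep, hlen2]
        have hrec := ih rest (by simp at hlen ⊢; omega)
          (fun w hw => hnz w (by simp [hw])) (nl ++ [x]) y
        rw [hrec]
        have hxy' : x ≠ y := fun h => hxy h.symm
        simp [mergeScan, hxy']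

theorem moveStep_start (ys : List Int) (hnz : ∀ y ∈ ys, y ≠ 0) :
    (ys.foldl moveStep ([], -1)).1 = mergeScan ys := by
  cases ys with
  | nil => rfl
  | cons x rest =>
    have hx : x ≠ 0 := hnz x (by simp)
    have hstep : moveStep ([], -1) x = (([] : List Int) ++ [x], (([] : List Int).length : Int)) := by
      simp [moveStep, hx]
    rw [List.foldl_cons, hstep]
    simpa using moveStep_pending rest.length rest le_rfl
      (fun w hw => hnz w (by simp [hw])) [] x

theorem move_list_eq (list : List Int) : move_list list = move_list_alt list := by
  unfold move_list move_list_alt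
  have h1 : (PySem.List.pyRange 0 (PySem.List.len list) 1).foldl
      (fun s i => moveStep s (PySem.List.pyGetD list i 0)) ([], -1)
      = list.foldl moveStep ([], -1) := by
    simpa [PySem.List.len] using
      PySem.List.foldl_pyRange_zero_pyGetD' list 0 moveStep (([] : List Int), (-1 : Int))
  have hnz : ∀ y ∈ list.filter (fun x => x != 0), y ≠ 0 := by
    intro y hy
    have := List.of_mem_filter hy
    simpa using this
  have h2 : (List.foldl moveStep ([], -1) list).1
      = mergeScan (list.filter (fun x => x != 0)) := by
    rw [foldl_moveStep_filter]
    exact moveStep_start _ hnz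
  simp only [h1, h2]

-- ===== VERDICT (by name: the statement is the Claim_ definition above) =====
theorem move_list_spec : Claim_equal_move_list := by
  intro list _
  unfold Spec_move_list
  exact move_list_eq list
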